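-- pv_equiv track=rewrite | github.com/jakub-rosiak/HammingCodes | hamming.py | bytes_to_bit_arrays
-- ===== SOURCE A (Python) =====
-- def byte_to_bit_array(byte):
--     return [int(bit) for bit in f'{byte:08b}']
--
-- def bytes_to_bit_arrays(data, bits_per_array):
--     all_bits = []
--     for byte in data:
--         all_bits.extend(byte_to_bit_array(byte))
--
--     result = []
--     for i in range(0, len(all_bits), bits_per_array):
--         if i + bits_per_array <= len(all_bits):
--             result.append(all_bits[i:i + bits_per_array])
--
--     return result
-- ===== SOURCE B (Python) =====
-- def bytes_to_bit_arrays(data, bits_per_array):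
--     result = []
--     current = []
--     for byte in data:
--         for ch in format(byte, '08b'):
--             current.append(int(ch))
--             if len(current) == bits_per_array:
--                 result.append(current)
--                 current = []
--     return result
-- ===== Notes on version B (the rewrite author's own statement) =====
-- stated objective: alternative
-- what changed: A first materialises the whole bit list and then slices it by an index range; B is a single streaming pass that appends each formatted bit into a running chunk buffer, emitting the buffer whenever it reaches bits_per_array and dropping the leftover; Pre_ excludes only the inputs on which A raises ValueError (a negative byte, or bits_per_array = 0 from range's zero step).
import Mathlib
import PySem

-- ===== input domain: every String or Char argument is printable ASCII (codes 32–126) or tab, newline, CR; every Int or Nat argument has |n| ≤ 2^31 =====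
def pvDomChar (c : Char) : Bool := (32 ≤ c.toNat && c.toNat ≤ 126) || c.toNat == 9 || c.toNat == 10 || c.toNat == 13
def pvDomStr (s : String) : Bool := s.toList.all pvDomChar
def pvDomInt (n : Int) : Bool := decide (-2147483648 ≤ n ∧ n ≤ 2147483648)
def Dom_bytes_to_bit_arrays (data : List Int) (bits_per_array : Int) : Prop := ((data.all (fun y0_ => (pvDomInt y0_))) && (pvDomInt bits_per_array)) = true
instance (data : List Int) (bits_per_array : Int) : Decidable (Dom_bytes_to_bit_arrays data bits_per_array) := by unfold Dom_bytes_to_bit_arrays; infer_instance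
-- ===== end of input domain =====

-- B replaces A's materialise-all-bits-then-slice-by-range scheme with a single streaming pass
-- that appends each formatted bit into a running chunk buffer (alternative decomposition, no
-- speed claim).


-- ===== PORT A =====
-- f'{byte:08b}' = format(byte, 'b') (PySem.Int.toBinChars) left-padded with '0' to width 8,
-- then int() on each character.  Exact for 0 ≤ byte, the only bytes Pre_ admits: for a negative
-- byte Python pads after the sign and int('-') raises ValueError (the .getD 0 is never reached
-- under Pre_).
def byte_to_bit_array (byte : Int) : List Int :=
  let s := PySem.Int.toBinChars byte
  (List.replicate (8 - s.length) '0' ++ s).map (fun c => (PySem.Int.ofChars? [c]).getD 0)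

def bytes_to_bit_arrays (data : List Int) (bits_per_array : Int) : List (List Int) :=
  let all_bits := data.foldl (fun acc byte => acc ++ byte_to_bit_array byte) []
  (PySem.List.pyRange 0 (PySem.List.len all_bits) bits_per_array).foldl
    (fun result i =>
      if i + bits_per_array ≤ PySem.List.len all_bits then
        result ++ [PySem.List.slice all_bits (some i) (some (i + bits_per_array))]
      else result) []

-- ===== PORT B =====
-- format(byte, '08b') is the same zero-padded binary string as in A's helper; int(ch) is exact
-- for digit characters (the .getD 0 is only reachable at the sign of a negative byte, outside Pre_).
def bytes_to_bit_arrays_alt (data : List Int) (bits_per_array : Int) : List (List Int) :=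
  (data.foldl (fun st byte =>
      (let s := PySem.Int.toBinChars byte
       List.replicate (8 - s.length) '0' ++ s).foldl
        (fun st ch =>
          let current := st.2 ++ [(PySem.Int.ofChars? [ch]).getD 0]
          if (current.length : Int) = bits_per_array then (st.1 ++ [current], ([] : List Int))
          else (st.1, current)) st)
    (([] : List (List Int)), ([] : List Int))).1

-- ===== PRECONDITION & SPEC =====
-- Pre_ excludes exactly the inputs where A raises ValueError: a negative byte (int('-') on the
-- sign character of f'{byte:08b}') and bits_per_array = 0 (range() arg 3 must not be zero).
def Pre_bytes_to_bit_arrays (data : List Int) (bits_per_array : Int) : Prop :=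
  (∀ b ∈ data, 0 ≤ b) ∧ bits_per_array ≠ 0
instance (data : List Int) (bits_per_array : Int) : Decidable (Pre_bytes_to_bit_arrays data bits_per_array) := by unfold Pre_bytes_to_bit_arrays; infer_instance

def pvWitness_bytes_to_bit_arrays : List Int × Int := ([5, 300], 4)

def Spec_bytes_to_bit_arrays (data : List Int) (bits_per_array : Int) (out : List (List Int)) : Prop := out = bytes_to_bit_arrays_alt data bits_per_array
instance (data : List Int) (bits_per_array : Int) (out : List (List Int)) : Decidable (Spec_bytes_to_bit_arrays data bits_per_array out) := by unfold Spec_bytes_to_bit_arrays; infer_instance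

-- ===== CLAIM (what is proved, stated in full; the proofs are below) =====
def Claim_equal_bytes_to_bit_arrays : Prop := ∀ (data : List Int) (bits_per_array : Int), Dom_bytes_to_bit_arrays data bits_per_array → Pre_bytes_to_bit_arrays data bits_per_array → Spec_bytes_to_bit_arrays data bits_per_array (bytes_to_bit_arrays data bits_per_array)


-- ===== LEMMAS AND PROOFS =====

-- Reference chunker: the complete consecutive k-blocks of l (leftover dropped), in closed form.
def chunksC (k : Nat) (l : List Int) : List (List Int) :=
  (List.range (l.length / k)).map (fun j => (l.drop (k * j)).take k)

-- One step of B's streaming chunker.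
def chunkStep (bpa : Int) (st : List (List Int) × List Int) (bit : Int) : List (List Int) × List Int :=
  let current := st.2 ++ [bit]
  if (current.length : Int) = bpa then (st.1 ++ [current], []) else (st.1, current)

theorem alt_eq_stream (data : List Int) (bpa : Int) :
    bytes_to_bit_arrays_alt data bpa
      = (List.foldl (chunkStep bpa) ([], []) (data.flatMap byte_to_bit_array)).1 := by
  unfold bytes_to_bit_arrays_alt
  rw [List.foldl_flatMap]
  congr 1
  apply PySem.List.foldl_congr_mem
  intro acc x _
  show _ = List.foldl (chunkStep bpa) acc (byte_to_bit_array x)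
  unfold byte_to_bit_array
  rw [List.foldl_map]
  rfl

theorem stream_small (k : Nat) : ∀ (c : List Int) (res : List (List Int)) (cur : List Int),
    cur.length + c.length < k →
    List.foldl (chunkStep (k : Int)) (res, cur) c = (res, cur ++ c) := by
  intro c
  induction c with
  | nil => simp
  | cons b c ih =>
    intro res cur h
    simp only [List.foldl_cons, chunkStep]
    rw [if_neg (by simp at h ⊢; omega)]
    rw [ih res (cur ++ [b]) (by simp at h ⊢; omega)]
    simp

theorem stream_full (k : Nat) : ∀ (c : List Int) (res : List (List Int)) (cur : List Int),
    cur.length + c.length = k → c ≠ [] →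
    List.foldl (chunkStep (k : Int)) (res, cur) c = (res ++ [cur ++ c], []) := by
  intro c
  induction c with
  | nil => simp
  | cons b c ih =>
    intro res cur h _
    simp only [List.foldl_cons, chunkStep]
    rcases c with _ | ⟨b2, c2⟩
    · rw [if_pos (by simp at h ⊢; omega)]
      simp
    · rw [if_neg (by simp at h ⊢; omega)]
      rw [ih res (cur ++ [b]) (by simp at h ⊢; omega) (by simp)]
      simp

theorem chunksC_cons (k : Nat) (l : List Int) (hk : 0 < k) (h : k ≤ l.length) :
    chunksC k l = l.take k :: chunksC k (l.drop k) := by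
  unfold chunksC
  rw [Nat.div_eq_sub_div hk h, List.range_succ_eq_map, List.map_cons, List.map_map, List.length_drop]
  apply List.cons_eq_cons.mpr
  constructor
  · simp
  · apply List.map_congr_left
    intro a _
    simp only [Function.comp_apply]
    rw [List.drop_drop]
    congr 2
    rw [Nat.mul_succ, Nat.add_comm]

theorem stream_eq_chunksC (k : Nat) (hk : 0 < k) : ∀ (n : Nat) (l : List Int), l.length = n →
    ∀ (res : List (List Int)),
    (List.foldl (chunkStep (k : Int)) (res, []) l).1 = res ++ chunksC k l := by
  intro n
  induction n using Nat.strong_induction_on with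
  | _ n ih =>
    intro l hl res
    rcases Nat.lt_or_ge l.length k with hlt | hge
    · rw [stream_small k l res [] (by simpa using hlt)]
      have h0 : l.length / k = 0 := Nat.div_eq_of_lt hlt
      simp [chunksC, h0]
    · have hsplit : l = l.take k ++ l.drop k := (List.take_append_drop k l).symm
      rw [chunksC_cons k l hk hge]
      conv_lhs => rw [hsplit]
      rw [List.foldl_append]
      rw [stream_full k (l.take k) res []
        (by simp only [List.length_nil, List.length_take, Nat.zero_add]; omega) (by
        intro hnil
        rcases List.take_eq_nil_iff.mp hnil with h0 | h0
        · omega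
        · subst h0; simp at hge; omega)]
      simp only [List.nil_append]
      rw [ih (l.drop k).length (by subst hl; simp; omega) (l.drop k) rfl]
      simp

theorem stream_neg (bpa : Int) (hneg : bpa < 0) : ∀ (l : List Int) (res : List (List Int)) (cur : List Int),
    List.foldl (chunkStep bpa) (res, cur) l = (res, cur ++ l) := by
  intro l
  induction l with
  | nil => simp
  | cons b l ih =>
    intro res cur
    simp only [List.foldl_cons, chunkStep]
    rw [if_neg (by intro hc; simp at hc; omega)]
    rw [ih]
    simp

theorem A_allbits (data : List Int) :
    data.foldl (fun acc byte => acc ++ byte_to_bit_array byte) [] = data.flatMap byte_to_bit_array := by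
  rw [PySem.List.foldl_append_eq_flatMap]
  rw [List.nil_append]

theorem filter_range_lt (m c : Nat) (h : c ≤ m) :
    (List.range m).filter (fun j => decide (j < c)) = List.range c := by
  induction m with
  | zero => simp [Nat.le_zero.mp h]
  | succ m ih =>
    rcases Nat.lt_or_ge c (m + 1) with h1 | h1
    · rw [List.range_succ, List.filter_append, ih (by omega)]
      simp; omega
    · have : c = m + 1 := by omega
      subst this
      rw [List.range_succ, List.filter_append, List.filter_eq_self.mpr]
      · simp
      · intro a ha; simp at ha ⊢; omega

theorem A_chunks (l : List Int) (k : Nat) (hk : 0 < k) :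
    (PySem.List.pyRange 0 (l.length : Int) (k : Int)).foldl
      (fun result i =>
        if i + (k : Int) ≤ (l.length : Int) then
          result ++ [PySem.List.slice l (some i) (some (i + (k : Int)))]
        else result) []
    = chunksC k l := by
  set n := l.length with hn
  rw [PySem.List.pyRange_of_pos 0 _ (by exact_mod_cast hk)]
  have hm : (if (0 : Int) < (n : Int) then (((n : Int) - 0 + (k : Int) - 1) / (k : Int)).toNat else 0)
      = (n + (k - 1)) / k := by
    split_ifs with hpos
    · have hcast : ((n : Int) - 0 + (k : Int) - 1) = ((n + (k - 1) : Nat) : Int) := by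
        push_cast; omega
      rw [hcast, ← Int.natCast_ediv, Int.toNat_natCast]
    · have hn0 : n = 0 := by omega
      rw [hn0, Nat.zero_add, Nat.div_eq_of_lt (by omega)]
  rw [hm]
  have step1 : List.foldl
      (fun result i =>
        if i + (k : Int) ≤ (n : Int) then
          result ++ [PySem.List.slice l (some i) (some (i + (k : Int)))]
        else result) []
      ((List.range ((n + (k - 1)) / k)).map (fun (j : Nat) => 0 + (k : Int) * (j : Int)))
      = List.foldl
      (fun result (j : Nat) =>
        if 0 + (k : Int) * (j : Int) + (k : Int) ≤ (n : Int) then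
          result ++ [PySem.List.slice l (some (0 + (k : Int) * (j : Int)))
            (some (0 + (k : Int) * (j : Int) + (k : Int)))]
        else result) [] (List.range ((n + (k - 1)) / k)) := List.foldl_map
  rw [step1]
  have hbody : List.foldl
      (fun result (j : Nat) =>
        if 0 + (k : Int) * (j : Int) + (k : Int) ≤ (n : Int) then
          result ++ [PySem.List.slice l (some (0 + (k : Int) * (j : Int)))
            (some (0 + (k : Int) * (j : Int) + (k : Int)))]
        else result) [] (List.range ((n + (k - 1)) / k))
      = List.foldl
      (fun result j =>
        if (j + 1) * k ≤ n then result ++ [(l.drop (k * j)).take k] else result)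
      [] (List.range ((n + (k - 1)) / k)) := by
    apply PySem.List.foldl_congr_mem
    intro acc j _
    have hiff : (0 + (k : Int) * (j : Int) + (k : Int) ≤ (n : Int)) ↔ ((j + 1) * k ≤ n) := by
      rw [show 0 + (k : Int) * (j : Int) + (k : Int) = (((j + 1) * k : Nat) : Int) from by push_cast; ring]
      constructor <;> intro hlin <;> exact_mod_cast hlin
    by_cases hcond : (j + 1) * k ≤ n
    · rw [if_pos (hiff.mpr hcond), if_pos hcond]
      have h1 : (0 + (k : Int) * (j : Int)) = ((k * j : Nat) : Int) := by push_cast; ring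
      rw [h1, show ((k * j : Nat) : Int) + (k : Int) = ((k * j : Nat) : Int) + ((k : Nat) : Int) from rfl,
        PySem.List.slice_natCast_add]
    · rw [if_neg (fun hc => hcond (hiff.mp hc)), if_neg hcond]
  rw [hbody, PySem.List.foldl_append_ite (fun j => (j + 1) * k ≤ n) _ _ []]
  rw [List.nil_append]
  have hfilter : (List.range ((n + (k - 1)) / k)).filter (fun j => decide ((j + 1) * k ≤ n))
      = List.range (n / k) := by
    rw [List.filter_congr (fun j _ => by
      show decide ((j + 1) * k ≤ n) = decide (j < n / k)
      simp only [decide_eq_decide]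
      rw [Nat.lt_iff_add_one_le, Nat.le_div_iff_mul_le hk])]
    exact filter_range_lt _ _ (Nat.div_le_div_right (by omega))
  rw [hfilter]
  rfl

-- ===== VERDICT (by name: the statement is the Claim_ definition above) =====
theorem bytes_to_bit_arrays_spec : Claim_equal_bytes_to_bit_arrays := by
  intro data bpa _ hpre
  obtain ⟨_, hz⟩ := hpre
  unfold Spec_bytes_to_bit_arrays
  rw [alt_eq_stream data bpa]
  show bytes_to_bit_arrays data bpa = _
  unfold bytes_to_bit_arrays
  simp only [PySem.List.len_eq]
  rw [A_allbits data]
  rcases lt_or_gt_of_ne hz with hneg | hpos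
  · rw [stream_neg bpa hneg]
    rw [PySem.List.pyRange_of_neg _ _ hneg]
    rw [if_neg (by omega)]
    simp
  · have hk : bpa = ((bpa.toNat : Nat) : Int) := (Int.toNat_of_nonneg (by omega)).symm
    rw [hk, stream_eq_chunksC bpa.toNat (by omega) (data.flatMap byte_to_bit_array).length _ rfl,
      List.nil_append]
    exact A_chunks (data.flatMap byte_to_bit_array) bpa.toNat (by omega)
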